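-- pv_equiv track=rewrite | github.com/fhgwright/fwgnss | fwgnss/parse/hemisphere.py | _ItemsByMask
-- ===== SOURCE A (Python) =====
-- def _ItemsByMask(value, sats=tuple(range(1, 33))):
--   sat_list = []
--   sat_bit = 1
--   for sat_num in sats:
--     if value & sat_bit:
--       sat_list.append(sat_num)
--     sat_bit <<= 1
--   return tuple(sat_list)
-- ===== SOURCE B (Python) =====
-- def _ItemsByMask(value, sats=tuple(range(1, 33))):
--   # Bound the mask to the bits A actually inspects (also normalises negatives),
--   # then walk only the SET bits, lowest first.
--   m = value & ((1 << len(sats)) - 1)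
--   sat_list = []
--   while m:
--     m2 = m & (m - 1)          # m with its lowest set bit cleared
--     low = m ^ m2              # the lowest set bit alone
--     sat_list.append(sats[low.bit_length() - 1])
--     m = m2
--   return tuple(sat_list)
-- ===== Notes on version B (the rewrite author's own statement) =====
-- stated objective: faster
-- what changed: Instead of scanning every position of sats with a doubling bit mask, B bounds the mask to len(sats) bits and then iterates only the SET bits of the mask (clear-lowest-bit loop, index via bit_length), so the loop runs once per set bit instead of once per satellite.
import Mathlib
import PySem

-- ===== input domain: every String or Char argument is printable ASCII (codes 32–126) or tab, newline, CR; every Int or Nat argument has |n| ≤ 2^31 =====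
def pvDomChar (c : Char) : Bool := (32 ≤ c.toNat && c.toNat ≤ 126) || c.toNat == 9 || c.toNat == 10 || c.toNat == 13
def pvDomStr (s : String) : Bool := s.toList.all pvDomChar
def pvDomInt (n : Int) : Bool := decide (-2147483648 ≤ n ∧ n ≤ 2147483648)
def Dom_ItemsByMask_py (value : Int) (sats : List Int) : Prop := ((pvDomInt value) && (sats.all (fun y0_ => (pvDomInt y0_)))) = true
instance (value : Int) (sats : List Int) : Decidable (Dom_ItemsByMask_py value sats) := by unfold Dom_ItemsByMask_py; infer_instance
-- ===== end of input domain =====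

-- B replaces A's scan over every position of sats (with a doubling probe bit) by a
-- clear-lowest-set-bit loop over the masked value, iterating once per set bit of the mask.

-- ===== PORT A =====
-- state = (sat_list, sat_bit); Python's 'if value & sat_bit' is 'band value sat_bit ≠ 0'
def ItemsByMask_py (value : Int) (sats : List Int) : List Int :=
  (sats.foldl
    (fun (st : List Int × Int) sat_num =>
      ((if PySem.Int.band value st.2 ≠ 0 then st.1 ++ [sat_num] else st.1), st.2 <<< (1 : Nat)))
    ([], 1)).1

-- ===== PORT B =====
-- the while-loop of Source B, abstracted over the 'append sats[idx]' action; m (the masked value) is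
-- nonnegative (band with a nonnegative mask), carried as a Nat; 'while m' is 'm ≠ 0';
-- Python's low.bit_length() - 1 is PySem.Int.bitLength low - 1
def itemsLowBitLoop (emit : Int → Int) (m : Nat) : List Int :=
  if h : m = 0 then []
  else
    emit ((PySem.Int.bitLength ((m ^^^ (m &&& (m - 1)) : Nat) : Int) : Int) - 1)
      :: itemsLowBitLoop emit (m &&& (m - 1))
termination_by m
decreasing_by exact Nat.lt_of_le_of_lt Nat.and_le_right (by omega)

def ItemsByMask_py_alt (value : Int) (sats : List Int) : List Int :=
  itemsLowBitLoop (fun idx => PySem.List.pyGetD sats idx 0)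
    (PySem.Int.band value (((1 : Int) <<< sats.length) - 1)).toNat

-- ===== PRECONDITION & SPEC =====
def Spec_ItemsByMask_py (value : Int) (sats : List Int) (out : List Int) : Prop := out = ItemsByMask_py_alt value sats
instance (value : Int) (sats : List Int) (out : List Int) : Decidable (Spec_ItemsByMask_py value sats out) := by unfold Spec_ItemsByMask_py; infer_instance

-- ===== CLAIM (what is proved, stated in full; the proofs are below) =====
def Claim_equal_ItemsByMask_py : Prop := ∀ (value : Int) (sats : List Int), Dom_ItemsByMask_py value sats → Spec_ItemsByMask_py value sats (ItemsByMask_py value sats)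

-- ===== LEMMAS AND PROOFS =====

-- ascending list of the set-bit positions of a Nat
def nbits (x : Nat) : List Nat :=
  if h : x = 0 then []
  else (if x % 2 = 1 then [0] else []) ++ (nbits (x / 2)).map (· + 1)
termination_by x
decreasing_by exact Nat.div_lt_self (Nat.pos_of_ne_zero h) one_lt_two

-- A's loop in recursion form: remaining sats, probe bit at exponent k
def listA (value : Int) : List Int → Nat → List Int
  | [], _ => []
  | s :: r, k => (if PySem.Int.band value (2 ^ k) ≠ 0 then [s] else []) ++ listA value r (k + 1)

lemma bit2_and (i j : Bool) (a b : Nat) :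
    (2 * a + i.toNat) &&& (2 * b + j.toNat) = 2 * (a &&& b) + (i && j).toNat := by
  rw [← Nat.bit_val, ← Nat.bit_val, Nat.land_bit, Nat.bit_val]

lemma bit2_xor (i j : Bool) (a b : Nat) :
    (2 * a + i.toNat) ^^^ (2 * b + j.toNat) = 2 * (a ^^^ b) + (i != j).toNat := by
  rw [← Nat.bit_val, ← Nat.bit_val, Nat.xor_bit, Nat.bit_val]

lemma odd_and_pred {x : Nat} (hx : x % 2 = 1) : x &&& (x - 1) = x - 1 := by
  have h1 : x = 2 * (x / 2) + (true : Bool).toNat := by simp; omega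
  have h2 : x - 1 = 2 * (x / 2) + (false : Bool).toNat := by simp; omega
  calc x &&& (x - 1) = (2 * (x / 2) + (true : Bool).toNat) &&& (2 * (x / 2) + (false : Bool).toNat) := by
        rw [← h1, ← h2]
    _ = 2 * ((x/2) &&& (x/2)) + (true && false).toNat := bit2_and ..
    _ = x - 1 := by simp [Nat.and_self]; omega

lemma odd_xor_pred {x : Nat} (hx : x % 2 = 1) : x ^^^ (x &&& (x - 1)) = 1 := by
  rw [odd_and_pred hx]
  have h1 : x = 2 * (x / 2) + (true : Bool).toNat := by simp; omega
  have h2 : x - 1 = 2 * (x / 2) + (false : Bool).toNat := by simp; omega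
  calc x ^^^ (x - 1) = (2 * (x / 2) + (true : Bool).toNat) ^^^ (2 * (x / 2) + (false : Bool).toNat) := by
        rw [← h1, ← h2]
    _ = 2 * ((x/2) ^^^ (x/2)) + (true != false).toNat := bit2_xor ..
    _ = 1 := by simp

lemma even_and_pred {t : Nat} (ht : 0 < t) : (2 * t) &&& (2 * t - 1) = 2 * (t &&& (t - 1)) := by
  have h1 : 2 * t = 2 * t + (false : Bool).toNat := by simp
  have h2 : 2 * t - 1 = 2 * (t - 1) + (true : Bool).toNat := by simp; omega
  calc (2 * t) &&& (2 * t - 1) = (2 * t + (false : Bool).toNat) &&& (2 * (t - 1) + (true : Bool).toNat) := by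
        rw [← h1, ← h2]
    _ = 2 * (t &&& (t - 1)) + (false && true).toNat := bit2_and ..
    _ = 2 * (t &&& (t - 1)) := by simp

lemma xor_two_mul (a b : Nat) : (2 * a) ^^^ (2 * b) = 2 * (a ^^^ b) := by
  have := bit2_xor false false a b
  simpa using this

lemma xor_add_of_and_eq : ∀ x y : Nat, y &&& x = y → (x ^^^ y) + y = x := by
  intro x
  induction x using Nat.strong_induction_on with
  | _ x IH =>
    intro y h
    rcases Nat.eq_zero_or_pos x with hx | hx
    · subst hx; rw [Nat.and_zero] at h; subst h; simp
    · have hxd : x / 2 < x := Nat.div_lt_self hx one_lt_two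
      rcases Nat.mod_two_eq_zero_or_one x with hi | hi <;>
        rcases Nat.mod_two_eq_zero_or_one y with hj | hj
      · have h1 : x = 2 * (x / 2) + (false : Bool).toNat := by simp; omega
        have h2 : y = 2 * (y / 2) + (false : Bool).toNat := by simp; omega
        rw [h2, h1, bit2_and] at h
        have hb : (y / 2) &&& (x / 2) = y / 2 := by simp at h; omega
        have := IH (x / 2) hxd (y / 2) hb
        rw [h1, h2, bit2_xor]
        simp at *
        omega
      · have h1 : x = 2 * (x / 2) + (false : Bool).toNat := by simp; omega
        have h2 : y = 2 * (y / 2) + (true : Bool).toNat := by simp; omega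
        rw [h2, h1, bit2_and] at h
        simp at h
        omega
      · have h1 : x = 2 * (x / 2) + (true : Bool).toNat := by simp; omega
        have h2 : y = 2 * (y / 2) + (false : Bool).toNat := by simp; omega
        rw [h2, h1, bit2_and] at h
        have hb : (y / 2) &&& (x / 2) = y / 2 := by simp at h; omega
        have := IH (x / 2) hxd (y / 2) hb
        rw [h1, h2, bit2_xor]
        simp at *
        omega
      · have h1 : x = 2 * (x / 2) + (true : Bool).toNat := by simp; omega
        have h2 : y = 2 * (y / 2) + (true : Bool).toNat := by simp; omega
        rw [h2, h1, bit2_and] at h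
        have hb : (y / 2) &&& (x / 2) = y / 2 := by simp at h; omega
        have := IH (x / 2) hxd (y / 2) hb
        rw [h1, h2, bit2_xor]
        simp at *
        omega

lemma sub_and_eq_xor (x w : Nat) : x - (x &&& w) = x ^^^ (x &&& w) := by
  have hsub : (x &&& w) &&& x = x &&& w := by
    apply Nat.eq_of_testBit_eq
    intro i
    simp only [Nat.testBit_land]
    cases x.testBit i <;> simp
  have := xor_add_of_and_eq x (x &&& w) hsub
  have hle : x &&& w ≤ x := Nat.and_le_left
  omega

lemma nbits_eq_filter_range : ∀ (L : Nat) (x : Nat), x < 2 ^ L →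
    nbits x = (List.range L).filter (fun i => x.testBit i) := by
  intro L
  induction L with
  | zero =>
    intro x hx
    interval_cases x
    simp [nbits]
  | succ L IH =>
    intro x hx
    by_cases h0 : x = 0
    · subst h0; simp [nbits, Nat.zero_testBit]
    · rw [nbits, dif_neg h0]
      have hx2 : x / 2 < 2 ^ L := by omega
      rw [List.range_succ_eq_map, List.filter_cons, List.filter_map]
      have htail : ((List.range L).filter ((fun i => x.testBit i) ∘ Nat.succ)).map Nat.succ
          = ((nbits (x / 2)).map (· + 1)) := by
        have : ((fun i => x.testBit i) ∘ Nat.succ) = (fun i => (x / 2).testBit i) := by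
          funext i; simp [Function.comp, Nat.testBit_succ]
        rw [this, ← IH (x / 2) hx2]
      rw [htail]
      rcases Nat.mod_two_eq_zero_or_one x with he | he
      · simp [Nat.testBit_zero, he]
      · simp [Nat.testBit_zero, he]

lemma and_pred_lt {t : Nat} (ht : 0 < t) : t &&& (t - 1) < t :=
  Nat.lt_of_le_of_lt Nat.and_le_right (by omega)

lemma low_ne_zero {t : Nat} (ht : 0 < t) : t ^^^ (t &&& (t - 1)) ≠ 0 := by
  intro h
  have h2 := and_pred_lt ht
  rw [Nat.xor_eq_zero_iff] at h
  omega

lemma itemsLowBitLoop_zero (f : Int → Int) : itemsLowBitLoop f 0 = [] := by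
  rw [itemsLowBitLoop]; rfl

lemma itemsLowBitLoop_pos {m : Nat} (h : m ≠ 0) (f : Int → Int) :
    itemsLowBitLoop f m
      = f ((PySem.Int.bitLength ((m ^^^ (m &&& (m - 1)) : Nat) : Int) : Int) - 1)
        :: itemsLowBitLoop f (m &&& (m - 1)) := by
  conv_lhs => rw [itemsLowBitLoop]
  rw [dif_neg h]

lemma itemsLowBitLoop_two_mul : ∀ (t : Nat) (f : Int → Int),
    itemsLowBitLoop f (2 * t) = itemsLowBitLoop (fun i => f (i + 1)) t := by
  intro t
  induction t using Nat.strong_induction_on with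
  | _ t IH =>
    intro f
    by_cases h0 : t = 0
    · subst h0; simp [itemsLowBitLoop_zero]
    · have ht : 0 < t := Nat.pos_of_ne_zero h0
      rw [itemsLowBitLoop_pos (by omega : ¬ 2 * t = 0), itemsLowBitLoop_pos h0]
      rw [even_and_pred ht]
      rw [xor_two_mul]
      have hbl : PySem.Int.bitLength ((2 * (t ^^^ (t &&& (t - 1))) : Nat) : Int)
          = PySem.Int.bitLength ((t ^^^ (t &&& (t - 1)) : Nat) : Int) + 1 := by
        have := PySem.Int.bitLength_natCast (m := 2 * (t ^^^ (t &&& (t - 1))))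
          (by have := low_ne_zero ht; omega)
        simpa [Nat.mul_div_cancel_left] using this
      rw [hbl, IH (t &&& (t - 1)) (and_pred_lt ht) f]
      refine congrArg₂ List.cons ?_ rfl
      push_cast
      ring_nf

lemma bitLength_one : PySem.Int.bitLength (1 : Int) = 1 := by decide

lemma itemsLowBitLoop_eq_nbits : ∀ (x : Nat) (f : Int → Int),
    itemsLowBitLoop f x = (nbits x).map (fun (j : Nat) => f (j : Int)) := by
  intro x
  induction x using Nat.strong_induction_on with
  | _ x IH =>
    intro f
    by_cases h0 : x = 0
    · subst h0; simp [itemsLowBitLoop_zero, nbits]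
    · have hx : 0 < x := Nat.pos_of_ne_zero h0
      have hxd : x / 2 < x := Nat.div_lt_self hx one_lt_two
      rw [nbits, dif_neg h0]
      rcases Nat.mod_two_eq_zero_or_one x with he | he
      · have hx2 : x = 2 * (x / 2) := by omega
        rw [if_neg (by omega)]
        conv_lhs => rw [hx2]
        rw [itemsLowBitLoop_two_mul, IH (x / 2) hxd]
        simp only [List.map_map, List.nil_append]
        apply List.map_congr_left
        intro j _
        simp [Function.comp]
      · rw [if_pos he]
        rw [itemsLowBitLoop_pos h0, odd_xor_pred he, odd_and_pred he]
        have hx2 : x - 1 = 2 * (x / 2) := by omega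
        rw [hx2, itemsLowBitLoop_two_mul, IH (x / 2) hxd]
        simp only [List.cons_append, List.nil_append, List.map_cons, List.map_map]
        refine congrArg₂ List.cons ?_ ?_
        · norm_num [bitLength_one]
        · apply List.map_congr_left
          intro j _
          simp [Function.comp]

lemma foldA_eq (value : Int) : ∀ (sats : List Int) (k : Nat) (acc : List Int),
    (sats.foldl
      (fun (st : List Int × Int) sat_num =>
        ((if PySem.Int.band value st.2 ≠ 0 then st.1 ++ [sat_num] else st.1), st.2 <<< (1 : Nat)))
      (acc, (2 : Int) ^ k)).1 = acc ++ listA value sats k := by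
  intro sats
  induction sats with
  | nil => intro k acc; simp [listA]
  | cons s r IH =>
    intro k acc
    rw [List.foldl_cons]
    have hsh : ((2 : Int) ^ k) <<< (1 : Nat) = (2 : Int) ^ (k + 1) := by
      rw [Int.shiftLeft_eq]; ring
    simp only [hsh]
    rw [listA]
    by_cases hb : PySem.Int.band value (2 ^ k) ≠ 0
    · rw [if_pos hb, if_pos hb, IH (k + 1) (acc ++ [s])]
      simp
    · rw [if_neg hb, if_neg hb, IH (k + 1) acc]
      simp

lemma listA_eq_filter (value : Int) : ∀ (sats : List Int) (k : Nat),
    listA value sats k =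
      ((List.range sats.length).filter (fun i => decide (PySem.Int.band value (2 ^ (k + i)) ≠ 0))).map
        (fun i => sats.getD i 0) := by
  intro sats
  induction sats with
  | nil => intro k; simp [listA]
  | cons s r IH =>
    intro k
    rw [listA, List.length_cons, List.range_succ_eq_map, List.filter_cons, List.filter_map]
    have hc : ((fun i => decide (PySem.Int.band value (2 ^ (k + i)) ≠ 0)) ∘ Nat.succ)
        = (fun i => decide (PySem.Int.band value (2 ^ ((k + 1) + i)) ≠ 0)) := by
      funext i
      simp only [Function.comp_apply]
      rw [show k + i.succ = k + 1 + i by omega]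
    rw [hc]
    by_cases hb0 : PySem.Int.band value (2 ^ k) = 0
    · rw [if_neg (by simp [hb0]), IH (k + 1)]
      rw [if_neg (by simp [hb0]), List.nil_append, List.map_map]
      apply List.map_congr_left
      intro i _
      simp [Function.comp]
    · rw [if_pos hb0, IH (k + 1)]
      rw [if_pos (by simp [hb0])]
      simp only [List.map_cons, List.singleton_append, List.map_map]
      refine congrArg₂ List.cons (by simp) ?_
      apply List.map_congr_left
      intro i _
      simp [Function.comp]

lemma pow_sub_one_nonneg (n : Nat) : (0 : Int) ≤ (2 : Int) ^ n - 1 := by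
  have : (1 : Int) ≤ 2 ^ n := one_le_pow₀ (by norm_num)
  linarith

lemma mask_toNat (n : Nat) : ((2 : Int) ^ n - 1).toNat = 2 ^ n - 1 := by
  have h1 : (1 : Int) ≤ 2 ^ n := one_le_pow₀ (by norm_num)
  have h2 : ((2 : Nat) ^ n : Int) = (2 : Int) ^ n := by push_cast; ring
  omega

lemma pow_toNat (i : Nat) : ((2 : Int) ^ i).toNat = 2 ^ i := by
  have h1 : (1 : Int) ≤ 2 ^ i := one_le_pow₀ (by norm_num)
  have h2 : ((2 : Nat) ^ i : Int) = (2 : Int) ^ i := by push_cast; ring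
  omega

lemma maskNat_lt (value : Int) (n : Nat) :
    (PySem.Int.band value ((2 : Int) ^ n - 1)).toNat < 2 ^ n := by
  have hp : (0 : Nat) < 2 ^ n := Nat.two_pow_pos _
  by_cases hv : 0 ≤ value
  · have : PySem.Int.band value ((2:Int)^n - 1)
        = ((value.toNat &&& ((2:Int)^n - 1).toNat : Nat) : Int) := by
      simp only [PySem.Int.band]
      rw [if_pos hv, if_pos (pow_sub_one_nonneg n)]
    rw [this, Int.toNat_natCast, mask_toNat]
    have := Nat.and_le_right (n := value.toNat) (m := 2 ^ n - 1)
    omega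
  · have : PySem.Int.band value ((2:Int)^n - 1)
        = ((((2:Int)^n - 1).toNat - (((2:Int)^n - 1).toNat &&& (-value - 1).toNat) : Nat) : Int) := by
      simp only [PySem.Int.band]
      rw [if_neg hv, if_pos (pow_sub_one_nonneg n)]
    rw [this, Int.toNat_natCast, mask_toNat]
    omega

lemma band_pow_ne_zero_iff (value : Int) (i : Nat) :
    decide (PySem.Int.band value ((2 : Int) ^ i) ≠ 0)
      = (if 0 ≤ value then value.toNat.testBit i else !(-value - 1).toNat.testBit i) := by
  have hpnn : (0 : Int) ≤ (2 : Int) ^ i := by positivity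
  by_cases hv : 0 ≤ value
  · have hband : PySem.Int.band value ((2:Int)^i)
        = ((value.toNat &&& ((2:Int)^i).toNat : Nat) : Int) := by
      simp only [PySem.Int.band]
      rw [if_pos hv, if_pos hpnn]
    rw [if_pos hv, hband, pow_toNat, Nat.and_two_pow]
    cases hb : value.toNat.testBit i <;> simp
  · have hband : PySem.Int.band value ((2:Int)^i)
        = ((((2:Int)^i).toNat - (((2:Int)^i).toNat &&& (-value - 1).toNat) : Nat) : Int) := by
      simp only [PySem.Int.band]
      rw [if_neg hv, if_pos hpnn]
    rw [if_neg hv, hband, pow_toNat]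
    have hcomm : 2 ^ i &&& (-value - 1).toNat = (-value - 1).toNat &&& 2 ^ i := Nat.land_comm ..
    rw [hcomm, Nat.and_two_pow]
    have hp : (0 : Nat) < 2 ^ i := Nat.two_pow_pos _
    cases hb : (-value - 1).toNat.testBit i <;> simp

lemma maskNat_testBit (value : Int) (n i : Nat) (h : i < n) :
    (PySem.Int.band value ((2 : Int) ^ n - 1)).toNat.testBit i
      = decide (PySem.Int.band value ((2 : Int) ^ i) ≠ 0) := by
  rw [band_pow_ne_zero_iff]
  by_cases hv : 0 ≤ value
  · have hband : PySem.Int.band value ((2:Int)^n - 1)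
        = ((value.toNat &&& ((2:Int)^n - 1).toNat : Nat) : Int) := by
      simp only [PySem.Int.band]
      rw [if_pos hv, if_pos (pow_sub_one_nonneg n)]
    rw [if_pos hv, hband, Int.toNat_natCast, mask_toNat]
    simp [h]
  · have hband : PySem.Int.band value ((2:Int)^n - 1)
        = ((((2:Int)^n - 1).toNat - (((2:Int)^n - 1).toNat &&& (-value - 1).toNat) : Nat) : Int) := by
      simp only [PySem.Int.band]
      rw [if_neg hv, if_pos (pow_sub_one_nonneg n)]
    rw [if_neg hv, hband, Int.toNat_natCast, mask_toNat, sub_and_eq_xor]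
    simp [Nat.testBit_xor, Nat.testBit_two_pow_sub_one, h]

lemma ItemsByMask_eq (value : Int) (sats : List Int) :
    ItemsByMask_py value sats = ItemsByMask_py_alt value sats := by
  unfold ItemsByMask_py ItemsByMask_py_alt
  have h1 : ((1 : Int) <<< sats.length) = (2 : Int) ^ sats.length := by
    rw [Int.shiftLeft_eq]; ring
  rw [h1]
  have h0 : (([], (1 : Int)) : List Int × Int) = (([], (2 : Int) ^ 0) : List Int × Int) := by norm_num
  rw [h0, foldA_eq value sats 0 [], List.nil_append, listA_eq_filter value sats 0]
  rw [itemsLowBitLoop_eq_nbits,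
    nbits_eq_filter_range sats.length _ (maskNat_lt value sats.length)]
  simp only [Nat.zero_add]
  rw [List.filter_congr (fun i hi =>
    maskNat_testBit value sats.length i (List.mem_range.mp hi))]
  apply List.map_congr_left
  intro j _
  simp [PySem.List.pyGetD_natCast]

-- ===== VERDICT (by name: the statement is the Claim_ definition above) =====
theorem ItemsByMask_py_spec : Claim_equal_ItemsByMask_py := by
  intro value sats _
  unfold Spec_ItemsByMask_py
  exact ItemsByMask_eq value sats
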